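-- pv_equiv track=rewrite | github.com/JLee21/autocompete-programming-contest | problem-sets/2019-10-30/so_far_so_good_candy.py | get_slice_total
-- ===== SOURCE A (Python) =====
-- def get_slice_total(a):
--     i = 0
--     slice_total = 0
--     while a[i] < 0:
--         i += 1
--     left = i
--
--     j = len(a) - 1
--     while a[j] < 0:
--         j -= 1
--
--     right = j
--
--     if left == right:
--         return 0
--
--     for k in range(left+1, right):
--         if a[k] < 0:
--             slice_total += 1
--
--     return slice_total
-- ===== SOURCE B (Python) =====
-- def get_slice_total(a):
--     idx = [k for k, v in enumerate(a) if v >= 0]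
--     left, right = idx[0], idx[-1]
--     return right - left + 1 - len(idx)
-- ===== Notes on version B (the rewrite author's own statement) =====
-- stated objective: simpler
-- what changed: Instead of A's two sentinel-scanning while loops plus a counting loop over the interior, B builds the list of indices of non-negative elements in one pass and returns the interior negative count by the closed form right - left + 1 - len(idx); subscripting the first and last entries of idx raises IndexError on empty or all-negative input exactly where A's runaway index loops do.
import Mathlib
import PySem

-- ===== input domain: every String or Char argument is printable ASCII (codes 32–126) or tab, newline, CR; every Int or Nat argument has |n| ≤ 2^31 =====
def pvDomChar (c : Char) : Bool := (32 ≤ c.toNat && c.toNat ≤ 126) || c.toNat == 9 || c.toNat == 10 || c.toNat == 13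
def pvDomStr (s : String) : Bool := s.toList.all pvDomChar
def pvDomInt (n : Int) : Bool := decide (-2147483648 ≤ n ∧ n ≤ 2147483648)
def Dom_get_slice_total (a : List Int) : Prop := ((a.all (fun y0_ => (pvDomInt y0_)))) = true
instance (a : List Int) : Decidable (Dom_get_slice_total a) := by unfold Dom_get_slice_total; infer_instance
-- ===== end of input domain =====

-- B replaces A's index-chasing while loops and interior counting loop by one pass collecting the
-- indices of non-negative elements and a closed-form count (objective: simpler).

-- ===== PORT A =====
-- `while a[i] < 0: i += 1` — i starts at 0 and only grows, so the index never wraps;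
-- the `none` branch is Python's IndexError (excluded by Pre_).
def pvFindLeft (a : List Int) (i : Nat) : Option Nat :=
  if h : i < a.length then
    if a[i] < 0 then pvFindLeft a (i + 1) else some i
  else none
termination_by a.length - i

-- `while a[j] < 0: j -= 1` — j may go negative, so Python's wraparound indexing (pyGetD) is used;
-- out of range = IndexError (excluded by Pre_).
def pvFindRight (a : List Int) (j : Int) : Option Int :=
  if h : PySem.Raise.InRange a.length j then
    if PySem.List.pyGetD a j 0 < 0 then pvFindRight a (j - 1) else some j
  else none
termination_by (j + a.length + 1).toNat
decreasing_by
  have h1 : -(a.length : Int) ≤ j := h.1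
  omega

def get_slice_total (a : List Int) : Int :=
  match pvFindLeft a 0 with
  | none => 0
  | some left =>
    match pvFindRight a ((a.length : Int) - 1) with
    | none => 0
    | some right =>
      if (left : Int) = right then 0
      else
        (PySem.List.pyRange ((left : Int) + 1) right 1).foldl
          (fun s k => if PySem.List.pyGetD a k 0 < 0 then s + 1 else s) 0

-- ===== PORT B =====
def get_slice_total_alt (a : List Int) : Int :=
  let idx := ((PySem.List.enumerate a).filter (fun kv => 0 ≤ kv.2)).map (·.1)
  match idx.head?, idx.getLast? with
  | some left, some right => right - left + 1 - idx.length
  | _, _ => 0   -- Python raises IndexError here (first subscript of the empty idx); excluded by Pre_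

-- ===== PRECONDITION & SPEC =====
-- A (and B) raise IndexError exactly when the list is empty or all elements are negative;
-- Pre_ admits every input on which A returns.
def Pre_get_slice_total (a : List Int) : Prop := ∃ v ∈ a, 0 ≤ v
instance (a : List Int) : Decidable (Pre_get_slice_total a) := by unfold Pre_get_slice_total; infer_instance

def pvWitness_get_slice_total : List Int := [-1, 3, -2, -4, 5, -1]

def Spec_get_slice_total (a : List Int) (out : Int) : Prop := out = get_slice_total_alt a
instance (a : List Int) (out : Int) : Decidable (Spec_get_slice_total a out) := by unfold Spec_get_slice_total; infer_instance

-- ===== CLAIM (what is proved, stated in full; the proofs are below) =====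
def Claim_equal_get_slice_total : Prop := ∀ (a : List Int), Dom_get_slice_total a → Pre_get_slice_total a → Spec_get_slice_total a (get_slice_total a)

-- ===== LEMMAS AND PROOFS =====

-- the Nat-indexed predicate "element at k is non-negative"
def pvP (a : List Int) (k : Nat) : Bool := decide (0 ≤ a.getD k 0)

-- Nat version of B's index list
def pvIdxN (a : List Int) : List Nat := (List.range a.length).filter (pvP a)

theorem pvIdx_eq_map (a : List Int) (s : Int) :
    (((PySem.List.enumerate a s).filter (fun kv => 0 ≤ kv.2)).map (·.1))
      = List.map (fun k : Nat => s + (k : Int)) ((List.range a.length).filter (pvP a)) := by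
  induction a generalizing s with
  | nil => simp [PySem.List.enumerate_nil]
  | cons x xs ih =>
    rw [PySem.List.enumerate_cons, List.length_cons, List.range_succ_eq_map, List.filter_cons,
        List.filter_cons, List.filter_map]
    have hPs : (pvP (x :: xs) ∘ Nat.succ) = pvP xs := by
      funext k; simp [pvP]
    rw [hPs]
    have hmaps : List.map (fun k : Nat => s + (k : Int)) (((List.range xs.length).filter (pvP xs)).map Nat.succ)
        = List.map (fun k : Nat => (s + 1) + (k : Int)) ((List.range xs.length).filter (pvP xs)) := by
      rw [List.map_map]
      apply List.map_congr_left
      intro k _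
      simp only [Function.comp]
      push_cast
      ring
    by_cases hx : 0 ≤ x
    · have h0 : pvP (x :: xs) 0 = true := by simp [pvP, hx]
      simp only [hx, decide_true, if_true, h0, List.map_cons, hmaps, ih (s + 1)]
      norm_num
    · have h0 : pvP (x :: xs) 0 = false := by simp [pvP, hx]
      simp only [hx, decide_false, Bool.false_eq_true, if_false, h0, hmaps, ih (s + 1)]

theorem pv_head_le {l : List Nat} (hs : l.Pairwise (· < ·)) (hne : l ≠ []) :
    ∀ x ∈ l, l.head hne ≤ x := by
  cases l with
  | nil => simp at hne
  | cons hd tl =>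
    intro x hx
    rcases List.mem_cons.mp hx with rfl | hx2
    · simp
    · exact le_of_lt ((List.pairwise_cons.mp hs).1 x hx2)

theorem pv_le_getLast : ∀ {l : List Nat}, l.Pairwise (· < ·) → (hne : l ≠ []) →
    ∀ x ∈ l, x ≤ l.getLast hne := by
  intro l
  induction l with
  | nil => intro _ hne; simp at hne
  | cons hd tl ih =>
    intro hs hne x hx
    cases tl with
    | nil =>
      simp at hx
      simp [hx]
    | cons y t =>
      obtain ⟨hhd, hs'⟩ := List.pairwise_cons.mp hs
      rw [List.getLast_cons (by simp)]
      rcases List.mem_cons.mp hx with rfl | hx2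
      · exact le_of_lt (hhd _ (List.getLast_mem (by simp)))
      · exact ih hs' (by simp) x hx2

theorem mem_pvIdxN {a : List Int} {k : Nat} :
    k ∈ pvIdxN a ↔ k < a.length ∧ 0 ≤ a.getD k 0 := by
  simp [pvIdxN, pvP, List.mem_filter]

theorem pvIdxN_sorted (a : List Int) : (pvIdxN a).Pairwise (· < ·) :=
  List.Pairwise.sublist List.filter_sublist List.pairwise_lt_range

theorem pvFindLeft_spec (a : List Int) (L : Nat) (hL : L < a.length) (hP : 0 ≤ a.getD L 0)
    (i : Nat) (hiL : i ≤ L) (hmin : ∀ k, i ≤ k → k < L → a.getD k 0 < 0) :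
    pvFindLeft a i = some L := by
  induction hd : L - i generalizing i with
  | zero =>
    have hiL' : i = L := by omega
    subst hiL'
    have hnn : ¬ a[i] < 0 := by
      rw [← List.getD_eq_getElem a 0 hL]; omega
    unfold pvFindLeft
    simp [hL, hnn]
  | succ d ih =>
    have hilt : i < L := by omega
    have hineg : a.getD i 0 < 0 := hmin i le_rfl hilt
    have hin : i < a.length := by omega
    have hneg : a[i] < 0 := by rw [← List.getD_eq_getElem a 0 hin]; exact hineg
    unfold pvFindLeft
    rw [dif_pos hin, if_pos hneg]
    exact ih (i + 1) (by omega) (fun k hk1 hk2 => hmin k (by omega) hk2) (by omega)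

theorem pvFindRight_spec (a : List Int) (R : Nat) (hR : R < a.length) (hP : 0 ≤ a.getD R 0)
    (j : Int) (hRj : (R : Int) ≤ j) (hj : j < a.length)
    (hmax : ∀ k : Nat, R < k → (k : Int) ≤ j → a.getD k 0 < 0) :
    pvFindRight a j = some (R : Int) := by
  induction hd : (j - (R : Int)).toNat generalizing j with
  | zero =>
    have hjR : j = (R : Int) := by omega
    subst hjR
    have hin : PySem.Raise.InRange a.length (R : Int) := ⟨by omega, by exact_mod_cast hR⟩
    have hval : PySem.List.pyGetD a (R : Int) 0 = a.getD R 0 := PySem.List.pyGetD_natCast ..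
    unfold pvFindRight
    rw [dif_pos hin, if_neg (by omega)]
  | succ d ih =>
    have hjlt : (R : Int) < j := by omega
    have hj0 : 0 ≤ j := by omega
    have hin : PySem.Raise.InRange a.length j := ⟨by omega, hj⟩
    have htn : j.toNat < a.length := by omega
    have hval : PySem.List.pyGetD a j 0 = a.getD j.toNat 0 := by
      have := PySem.List.pyGetD_natCast a j.toNat (0 : Int)
      rwa [Int.toNat_of_nonneg hj0] at this
    have hneg : PySem.List.pyGetD a j 0 < 0 := by
      rw [hval]
      exact hmax j.toNat (by omega) (by omega)
    unfold pvFindRight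
    rw [dif_pos hin, if_pos hneg]
    exact ih (j - 1) (by omega) (by omega) (fun k hk1 hk2 => hmax k hk1 (by omega)) (by omega)

theorem pvFoldl_count (a : List Int) (l : List Int) (s : Int) :
    l.foldl (fun s k => if PySem.List.pyGetD a k 0 < 0 then s + 1 else s) s
      = s + l.countP (fun k => PySem.List.pyGetD a k 0 < 0) := by
  induction l generalizing s with
  | nil => simp
  | cons x t ih =>
    simp only [List.foldl_cons, List.countP_cons, ih]
    by_cases hx : PySem.List.pyGetD a x 0 < 0 <;> (simp [hx]; try omega)

theorem pv_count_interior (a : List Int) (L R : Nat) (hLR : L < R) (hRlt : R < a.length)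
    (hPL : pvP a L = true) (hPR : pvP a R = true)
    (hlo : ∀ k, k < L → pvP a k = false) (hhi : ∀ k, R < k → k < a.length → pvP a k = false) :
    (List.range a.length).countP (pvP a)
      = (List.range (R - L - 1)).countP (fun t => pvP a (L + 1 + t)) + 2 := by
  have hn : a.length = L + (1 + ((R - L - 1) + (1 + (a.length - R - 1)))) := by omega
  have h1 : List.range' R 1 ++ List.range' (R + 1) (a.length - R - 1)
      = List.range' R (1 + (a.length - R - 1)) := by
    have := List.range'_append (s := R) (m := 1) (n := a.length - R - 1) (step := 1)
    simpa using this
  have h2 : List.range' (L + 1) (R - L - 1) ++ List.range' R (1 + (a.length - R - 1))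
      = List.range' (L + 1) ((R - L - 1) + (1 + (a.length - R - 1))) := by
    have := List.range'_append (s := L + 1) (m := R - L - 1) (n := 1 + (a.length - R - 1)) (step := 1)
    rw [show L + 1 + 1 * (R - L - 1) = R by omega] at this
    simpa using this
  have h3 : List.range' L 1 ++ List.range' (L + 1) ((R - L - 1) + (1 + (a.length - R - 1)))
      = List.range' L (1 + ((R - L - 1) + (1 + (a.length - R - 1)))) := by
    have := List.range'_append (s := L) (m := 1) (n := (R - L - 1) + (1 + (a.length - R - 1))) (step := 1)
    simpa using this
  have h4 : List.range' 0 L ++ List.range' L (1 + ((R - L - 1) + (1 + (a.length - R - 1))))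
      = List.range' 0 a.length := by
    have := List.range'_append (s := 0) (m := L) (n := 1 + ((R - L - 1) + (1 + (a.length - R - 1)))) (step := 1)
    rw [show 0 + 1 * L = L by omega] at this
    rw [this, ← hn]
  rw [List.range_eq_range', ← h4, ← h3, ← h2, ← h1]
  simp only [List.countP_append, List.range'_one]
  have c0 : (List.range' 0 L).countP (pvP a) = 0 := by
    rw [List.countP_eq_zero]
    intro k hk
    simp [hlo k (by simpa using (List.mem_range'_1.mp hk).2)]
  have c4 : (List.range' (R + 1) (a.length - R - 1)).countP (pvP a) = 0 := by
    rw [List.countP_eq_zero]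
    intro k hk
    obtain ⟨hk1, hk2⟩ := List.mem_range'_1.mp hk
    simp [hhi k (by omega) (by omega)]
  have cint : (List.range' (L + 1) (R - L - 1)).countP (pvP a)
      = (List.range (R - L - 1)).countP (fun t => pvP a (L + 1 + t)) := by
    rw [List.range'_eq_map_range, List.countP_map]
    rfl
  rw [c0, c4, cint]
  simp [hPL, hPR]
  omega

theorem pv_main (a : List Int) (h : Pre_get_slice_total a) :
    get_slice_total a = get_slice_total_alt a := by
  obtain ⟨v, hv, hv0⟩ := h
  obtain ⟨kv, hkv, hkveq⟩ := List.mem_iff_getElem.mp hv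
  have hkmem : kv ∈ pvIdxN a :=
    mem_pvIdxN.mpr ⟨hkv, by rw [List.getD_eq_getElem a 0 hkv, hkveq]; exact hv0⟩
  have hne : pvIdxN a ≠ [] := List.ne_nil_of_mem hkmem
  have hsort := pvIdxN_sorted a
  set L := (pvIdxN a).head hne with hLdef
  set R := (pvIdxN a).getLast hne with hRdef
  have hLmem : L ∈ pvIdxN a := List.head_mem hne
  have hRmem : R ∈ pvIdxN a := List.getLast_mem hne
  obtain ⟨hLlt, hLP⟩ := mem_pvIdxN.mp hLmem
  obtain ⟨hRlt, hRP⟩ := mem_pvIdxN.mp hRmem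
  have hmin : ∀ k ∈ pvIdxN a, L ≤ k := pv_head_le hsort hne
  have hmax : ∀ k ∈ pvIdxN a, k ≤ R := pv_le_getLast hsort hne
  have hLR' : L ≤ R := hmin R hRmem
  have hlo : ∀ k, k < L → a.getD k 0 < 0 := by
    intro k hk
    by_contra hge
    push_neg at hge
    have hm := hmin k (mem_pvIdxN.mpr ⟨by omega, hge⟩)
    omega
  have hhi : ∀ k, R < k → k < a.length → a.getD k 0 < 0 := by
    intro k hk hk2
    by_contra hge
    push_neg at hge
    have hm := hmax k (mem_pvIdxN.mpr ⟨hk2, hge⟩)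
    omega
  have hleft : pvFindLeft a 0 = some L :=
    pvFindLeft_spec a L hLlt hLP 0 (Nat.zero_le _) (fun k _ hk2 => hlo k hk2)
  have hright : pvFindRight a ((a.length : Int) - 1) = some (R : Int) :=
    pvFindRight_spec a R hRlt hRP _ (by omega) (by omega)
      (fun k hk1 hk2 => hhi k hk1 (by omega))
  -- B's value
  have hidx : (((PySem.List.enumerate a).filter (fun kv => 0 ≤ kv.2)).map (·.1))
      = List.map (fun k : Nat => (k : Int)) (pvIdxN a) := by
    have h0 := pvIdx_eq_map a 0
    simpa [pvIdxN] using h0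
  have hmapne : List.map (fun k : Nat => (k : Int)) (pvIdxN a) ≠ [] := by simpa using hne
  have hhead : (List.map (fun k : Nat => (k : Int)) (pvIdxN a)).head? = some (L : Int) := by
    rw [List.head?_map, List.head?_eq_some_head hne]
    rfl
  have hlast : (List.map (fun k : Nat => (k : Int)) (pvIdxN a)).getLast? = some (R : Int) := by
    rw [List.getLast?_map, List.getLast?_eq_some_getLast hne]
    rfl
  have hB : get_slice_total_alt a = (R : Int) - (L : Int) + 1 - ((pvIdxN a).length : Int) := by
    unfold get_slice_total_alt
    simp only [hidx, hhead, hlast, List.length_map]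
  by_cases hLR : L = R
  · -- only one non-negative element: both sides are 0
    have hone : pvIdxN a = [L] := by
      cases hE : pvIdxN a with
      | nil => exact absurd hE hne
      | cons hd tl =>
        have h1 : (pvIdxN a).head? = some L := List.head?_eq_some_head hne
        have h2 : (pvIdxN a).head? = some hd := by rw [hE]; rfl
        have hhd : hd = L := by rw [h1] at h2; exact (Option.some.inj h2).symm
        cases tl with
        | nil => rw [hhd]
        | cons y t =>
          have hy : y ∈ pvIdxN a := by rw [hE]; simp
          have hlt : hd < y := by
            rw [hE] at hsort
            exact (List.pairwise_cons.mp hsort).1 y (by simp)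
          have hle := hmax y hy
          omega
    unfold get_slice_total
    simp only [hleft, hright]
    rw [if_pos (show ((L : Int)) = (R : Int) by exact_mod_cast hLR)]
    rw [hB, hone]
    simp [hLR]
  · have hLRlt : L < R := by omega
    unfold get_slice_total
    simp only [hleft, hright]
    rw [if_neg (show ¬ ((L : Int)) = (R : Int) by exact_mod_cast hLR)]
    rw [pvFoldl_count a _ 0, zero_add]
    rw [PySem.List.pyRange_one, List.countP_map]
    have hcount : List.countP ((fun k => decide (PySem.List.pyGetD a k 0 < 0)) ∘ fun k : Nat => (L : Int) + 1 + (k : Int))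
        (List.range ((R : Int) - ((L : Int) + 1)).toNat)
        = List.countP (fun t => decide (a.getD (L + 1 + t) 0 < 0)) (List.range (R - L - 1)) := by
      rw [show ((R : Int) - ((L : Int) + 1)).toNat = R - L - 1 by omega]
      apply List.countP_congr
      intro t _
      have hcast : (L : Int) + 1 + (t : Int) = ((L + 1 + t : Nat) : Int) := by push_cast; ring
      simp only [Function.comp, hcast, PySem.List.pyGetD_natCast]
    rw [hcount, hB]
    -- counting identities
    have hsum : (List.range (R - L - 1)).countP (fun t => pvP a (L + 1 + t))
        + (List.range (R - L - 1)).countP (fun t => decide (a.getD (L + 1 + t) 0 < 0))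
        = R - L - 1 := by
      have hlen := List.length_eq_countP_add_countP (fun t => pvP a (L + 1 + t))
        (l := List.range (R - L - 1))
      rw [List.length_range] at hlen
      have : (List.range (R - L - 1)).countP (fun t => decide ¬ (pvP a (L + 1 + t)) = true)
          = (List.range (R - L - 1)).countP (fun t => decide (a.getD (L + 1 + t) 0 < 0)) := by
        apply List.countP_congr
        intro t _
        simp [pvP]
        try omega
      omega
    have hm : (pvIdxN a).length
        = (List.range (R - L - 1)).countP (fun t => pvP a (L + 1 + t)) + 2 := by
      have := pv_count_interior a L R hLRlt hRlt
        (by simp only [pvP, decide_eq_true_eq]; exact hLP)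
        (by simp only [pvP, decide_eq_true_eq]; exact hRP)
        (fun k hk => by simp only [pvP, decide_eq_false_iff_not, not_le]; exact hlo k hk)
        (fun k hk1 hk2 => by simp only [pvP, decide_eq_false_iff_not, not_le]; exact hhi k hk1 hk2)
      rw [pvIdxN, ← List.countP_eq_length_filter]
      exact this
    omega

-- ===== VERDICT (by name: the statement is the Claim_ definition above) =====
theorem get_slice_total_spec : Claim_equal_get_slice_total := by
  intro a _ hpre
  exact pv_main a hpre
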